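-- pv_equiv track=rewrite | github.com/tianqiyuan520/tianqiyuan520.github.com | temp/[简单版]自动求导.py | douhao
-- ===== SOURCE A (Python) =====
-- def douhao(data:list,time=1):
--     '''分离逗号 time分离次数'''
--     result = [[]]
--     time_ = 0
--     for i in data:
--         if i == [','] and time_ < time:
--             time_ += 1
--             result.append([])
--         else:
--             result[-1].append(i)
--     return result
-- ===== SOURCE B (Python) =====
-- def douhao(data: list, time=1):
--     '''分离逗号 time分离次数'''
--     result = []
--     rest = data
--     t = time
--     while t > 0 and [','] in rest:
--         k = rest.index([','])
--         result.append(rest[:k])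
--         rest = rest[k + 1:]
--         t -= 1
--     result.append(rest)
--     return result
-- ===== Notes on version B (the rewrite author's own statement) =====
-- stated objective: alternative
-- what changed: Instead of A's element-wise loop with a running separator counter and append-to-last-chunk, B repeatedly finds the first [','] with list.index and slices the list into a chunk and a remainder, up to time cuts.
import Mathlib
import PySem

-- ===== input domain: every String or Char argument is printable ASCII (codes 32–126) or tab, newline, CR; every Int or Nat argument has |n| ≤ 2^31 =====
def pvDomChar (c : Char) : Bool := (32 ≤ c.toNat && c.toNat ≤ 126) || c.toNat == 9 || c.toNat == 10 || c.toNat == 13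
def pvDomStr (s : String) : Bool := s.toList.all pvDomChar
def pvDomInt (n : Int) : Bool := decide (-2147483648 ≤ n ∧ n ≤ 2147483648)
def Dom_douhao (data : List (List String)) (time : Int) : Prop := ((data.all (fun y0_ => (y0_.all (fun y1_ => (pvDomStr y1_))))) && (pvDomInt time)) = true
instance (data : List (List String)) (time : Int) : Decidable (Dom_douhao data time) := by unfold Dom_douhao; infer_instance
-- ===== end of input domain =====

-- B splits by repeatedly finding the first [','] and slicing, instead of A's running
-- separator counter with append-to-last-chunk; same return value, alternative decomposition.

-- ===== PORT A =====
-- one iteration of A's for-loop: state = (result, time_)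
def douhaoStep (time : Int) (st : List (List (List String)) × Int) (i : List String) :
    List (List (List String)) × Int :=
  if i = [","] ∧ st.2 < time then (st.1 ++ [[]], st.2 + 1)          -- result.append([])
  else (st.1.dropLast ++ [st.1.getLastD [] ++ [i]], st.2)           -- result[-1].append(i)

def douhao (data : List (List String)) (time : Int) : List (List (List String)) :=
  (data.foldl (douhaoStep time) ([[]], 0)).1

-- ===== PORT B =====
-- the while loop of Source B; Python rest.index([',']) (element present) = List.idxOf,
-- rest[:k] = take k and rest[k+1:] = drop (k+1), exact since 0 ≤ k ≤ len(rest)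
def douhaoGo (result : List (List (List String))) (rest : List (List String)) (t : Int) :
    List (List (List String)) :=
  if h : 0 < t ∧ [","] ∈ rest then
    let k := rest.idxOf [","]
    douhaoGo (result ++ [rest.take k]) (rest.drop (k + 1)) (t - 1)
  else result ++ [rest]
termination_by t.toNat
decreasing_by omega

def douhao_alt (data : List (List String)) (time : Int) : List (List (List String)) :=
  douhaoGo [] data time

-- ===== PRECONDITION & SPEC =====
def Spec_douhao (data : List (List String)) (time : Int) (out : List (List (List String))) : Prop := out = douhao_alt data time
instance (data : List (List String)) (time : Int) (out : List (List (List String))) : Decidable (Spec_douhao data time out) := by unfold Spec_douhao; infer_instance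

-- ===== CLAIM (what is proved, stated in full; the proofs are below) =====
def Claim_equal_douhao : Prop := ∀ (data : List (List String)) (time : Int), Dom_douhao data time → Spec_douhao data time (douhao data time)

-- ===== LEMMAS AND PROOFS =====

-- common reference shape: the split of xs with t remaining cuts
def douhaoSpecFn : List (List String) → Int → List (List (List String))
  | [], _ => [[]]
  | x :: rest, t =>
    if x = [","] ∧ 0 < t then [] :: douhaoSpecFn rest (t - 1)
    else (x :: (douhaoSpecFn rest t).headD []) :: (douhaoSpecFn rest t).tail

theorem specFn_head_tail (xs : List (List String)) (t : Int) :
    (douhaoSpecFn xs t).headD [] :: (douhaoSpecFn xs t).tail = douhaoSpecFn xs t := by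
  cases xs with
  | nil => simp [douhaoSpecFn]
  | cons x rest => simp only [douhaoSpecFn]; split <;> simp

theorem douhaoSpecFn_ne_nil (xs : List (List String)) (t : Int) : douhaoSpecFn xs t ≠ [] := by
  cases xs with
  | nil => simp [douhaoSpecFn]
  | cons x rest => simp only [douhaoSpecFn]; split <;> simp

-- A's fold, started from any state, lands in the reference shape
theorem foldA_eq_spec (xs : List (List String)) (time c : Int)
    (res : List (List (List String))) (cur : List (List String)) :
    (List.foldl (douhaoStep time) (res ++ [cur], c) xs).1 =
      res ++ (cur ++ (douhaoSpecFn xs (time - c)).headD []) :: (douhaoSpecFn xs (time - c)).tail := by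
  induction xs generalizing c res cur with
  | nil => simp [douhaoSpecFn]
  | cons x rest ih =>
    simp only [List.foldl_cons, douhaoStep]
    by_cases hx : x = [","] ∧ c < time
    · rw [if_pos hx]
      have h2 : res ++ [cur] ++ [[]] = (res ++ [cur]) ++ [([] : List (List String))] := by simp
      rw [show (res ++ [cur] ++ [([] : List (List String))], c + 1) = ((res ++ [cur]) ++ [[]], c + 1) by simp]
      rw [ih (c + 1) (res ++ [cur]) []]
      have hs : douhaoSpecFn (x :: rest) (time - c) = [] :: douhaoSpecFn rest (time - c - 1) := by
        simp only [douhaoSpecFn]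
        rw [if_pos ⟨hx.1, by omega⟩]
      rw [hs]
      have he : time - (c + 1) = time - c - 1 := by ring
      rw [he]
      simp only [List.nil_append, List.headD_cons, List.tail_cons, List.append_nil]
      rw [specFn_head_tail]
      simp
    · rw [if_neg hx]
      simp only [List.dropLast_concat, List.getLastD_concat]
      rw [ih c res (cur ++ [x])]
      have hs : douhaoSpecFn (x :: rest) (time - c) =
          (x :: (douhaoSpecFn rest (time - c)).headD []) :: (douhaoSpecFn rest (time - c)).tail := by
        simp only [douhaoSpecFn]
        rw [if_neg (by intro ⟨h1, h2⟩; exact hx ⟨h1, by omega⟩)]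
      rw [hs]
      simp

theorem douhao_eq_spec (data : List (List String)) (time : Int) :
    douhao data time = douhaoSpecFn data time := by
  have h := foldA_eq_spec data time 0 [] []
  simp only [List.nil_append] at h
  unfold douhao
  rw [h]
  have hne := douhaoSpecFn_ne_nil data (time - 0)
  cases hs : douhaoSpecFn data (time - 0) with
  | nil => exact absurd hs hne
  | cons a l => simp [show time - 0 = time from by ring] at hs ⊢; rw [hs]

-- reference shape when B's while-guard fails: one chunk, the whole rest
theorem spec_stop (rest : List (List String)) (t : Int) (h : ¬ (0 < t ∧ [","] ∈ rest)) :
    douhaoSpecFn rest t = [rest] := by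
  induction rest with
  | nil => simp [douhaoSpecFn]
  | cons x rs ih =>
    simp only [douhaoSpecFn]
    rw [if_neg (by intro ⟨h1, h2⟩; exact h ⟨h2, by simp [h1]⟩)]
    rw [ih (by intro ⟨h1, h2⟩; exact h ⟨h1, by simp [h2]⟩)]
    simp

-- reference shape when B's while-guard holds: cut at the first separator
theorem spec_split (rest : List (List String)) (t : Int) (ht : 0 < t) (hm : [","] ∈ rest) :
    douhaoSpecFn rest t =
      rest.take (rest.idxOf [","]) :: douhaoSpecFn (rest.drop (rest.idxOf [","] + 1)) (t - 1) := by
  induction rest with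
  | nil => simp at hm
  | cons x rs ih =>
    by_cases hx : x = [","]
    · subst hx
      simp [douhaoSpecFn, ht, List.idxOf_cons_self]
    · have hm' : [","] ∈ rs := by
        rcases List.mem_cons.mp hm with h | h
        · exact absurd h.symm hx
        · exact h
      have hidx : (x :: rs).idxOf [","] = rs.idxOf [","] + 1 := by
        exact List.idxOf_cons_ne rs hx
      simp only [douhaoSpecFn]
      rw [if_neg (by intro ⟨h1, _⟩; exact hx h1)]
      rw [ih hm', hidx]
      simp

-- B's loop, started from any accumulator, lands in the reference shape
theorem goB_eq_spec (t : Int) (rest : List (List String)) (result : List (List (List String))) :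
    douhaoGo result rest t = result ++ douhaoSpecFn rest t := by
  rw [douhaoGo]
  split
  · next h =>
    rw [goB_eq_spec (t - 1) (rest.drop (rest.idxOf [","] + 1)) (result ++ [rest.take (rest.idxOf [","])])]
    rw [spec_split rest t h.1 h.2]
    simp
  · next h => rw [spec_stop rest t h]
termination_by t.toNat
decreasing_by omega

-- ===== VERDICT (by name: the statement is the Claim_ definition above) =====
theorem douhao_spec : Claim_equal_douhao := by
  intro data time _
  unfold Spec_douhao douhao_alt
  rw [goB_eq_spec, douhao_eq_spec]
  simp
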